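-- pv_equiv track=rewrite | github.com/facundobatista/adventofcode | 2023/12/proc2.py | _produce_possibilities
-- ===== SOURCE A (Python) =====
-- from itertools import product
--
-- def _produce_possibilities(mustcount, srccond):
--     qpos = [idx for idx, char in enumerate(srccond) if char == "?"]
--     cond = list(srccond)
--     for possib in product("#.", repeat=len(qpos)):
--         for pos, char in zip(qpos, possib):
--             cond[pos] = char
--         if cond.count("#") != mustcount:
--             continue
--         yield "".join(cond)
-- ===== SOURCE B (Python) =====
-- from itertools import combinations
--
-- def _produce_possibilities(mustcount, srccond):
--     qpos = [idx for idx, char in enumerate(srccond) if char == "?"]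
--     needed = mustcount - srccond.count("#")
--     if needed < 0 or needed > len(qpos):
--         return
--     for chosen in combinations(qpos, needed):
--         yield "".join(
--             "#" if idx in chosen else ("." if char == "?" else char)
--             for idx, char in enumerate(srccond)
--         )
-- ===== Notes on version B (the rewrite author's own statement) =====
-- stated objective: faster
-- what changed: A enumerates all 2^k '#'/'.' assignments to the k '?' positions and filters by total '#' count; B computes needed = mustcount - existing '#' and directly enumerates only the C(k, needed) combinations of '?' positions that become '#', which coincides with the filtered product order.
import Mathlib
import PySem

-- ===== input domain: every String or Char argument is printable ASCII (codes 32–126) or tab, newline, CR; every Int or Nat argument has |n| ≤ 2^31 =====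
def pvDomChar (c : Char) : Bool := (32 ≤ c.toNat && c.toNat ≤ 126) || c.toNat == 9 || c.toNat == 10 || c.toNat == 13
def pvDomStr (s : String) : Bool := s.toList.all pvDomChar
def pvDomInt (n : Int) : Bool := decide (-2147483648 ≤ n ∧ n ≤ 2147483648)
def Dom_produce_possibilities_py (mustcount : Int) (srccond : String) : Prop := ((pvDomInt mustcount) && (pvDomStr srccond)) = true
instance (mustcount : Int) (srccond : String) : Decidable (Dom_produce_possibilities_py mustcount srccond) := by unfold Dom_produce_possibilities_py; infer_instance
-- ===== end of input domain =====

-- B replaces A's enumeration of all 2^k '#'/'.' fills of the '?' positions (filtered by total '#' count)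
-- with a direct enumeration of the C(k, needed) combinations of '?' positions that become '#', in the same order (objective: faster).


-- ===== PORT A =====
-- product("#.", repeat=n): first component varies slowest, '#' before '.'
def pvProd : Nat → List (List Char)
  | 0 => [[]]
  | n + 1 => (pvProd n).map (fun l => '#' :: l) ++ (pvProd n).map (fun l => '.' :: l)

-- A is a generator; its sequence of yields is returned as a list. 'cond' is threaded across
-- iterations exactly as A mutates it in place. cond.count("#") is List.count (1-char needle).
def produce_possibilities_py (mustcount : Int) (srccond : String) : List String :=
  let qpos : List Int :=
    ((PySem.List.enumerate srccond.toList 0).filter (fun p => p.2 == '?')).map (fun p => p.1)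
  let cond : List Char := srccond.toList
  ((pvProd qpos.length).foldl
    (fun st possib =>
      let c := (qpos.zip possib).foldl (fun c pc => PySem.List.pySetD c pc.1 pc.2) st.1
      if (PySem.List.count c '#' : Int) ≠ mustcount then (c, st.2)
      else (c, st.2 ++ [String.ofList c]))
    (cond, [])).2

-- ===== PORT B =====
-- itertools.combinations(xs, n), in its order: those containing xs.head first
def pvCombs : List Int → Nat → List (List Int)
  | _, 0 => [[]]
  | [], _ + 1 => []
  | x :: xs, n + 1 => (pvCombs xs n).map (fun l => x :: l) ++ pvCombs xs (n + 1)

-- B is a generator too; srccond.count("#") is List.count on the chars (1-char needle).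
def produce_possibilities_py_alt (mustcount : Int) (srccond : String) : List String :=
  let qpos : List Int :=
    ((PySem.List.enumerate srccond.toList 0).filter (fun p => p.2 == '?')).map (fun p => p.1)
  let needed : Int := mustcount - (PySem.List.count srccond.toList '#' : Int)
  if needed < 0 ∨ (qpos.length : Int) < needed then []
  else
    (pvCombs qpos needed.toNat).map (fun chosen =>
      String.ofList ((PySem.List.enumerate srccond.toList 0).map
        (fun p => if chosen.contains p.1 then '#' else if p.2 == '?' then '.' else p.2)))

-- ===== PRECONDITION & SPEC =====
def Spec_produce_possibilities_py (mustcount : Int) (srccond : String) (out : List String) : Prop := out = produce_possibilities_py_alt mustcount srccond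
instance (mustcount : Int) (srccond : String) (out : List String) : Decidable (Spec_produce_possibilities_py mustcount srccond out) := by unfold Spec_produce_possibilities_py; infer_instance

-- ===== CLAIM (what is proved, stated in full; the proofs are below) =====
def Claim_equal_produce_possibilities_py : Prop := ∀ (mustcount : Int) (srccond : String), Dom_produce_possibilities_py mustcount srccond → Spec_produce_possibilities_py mustcount srccond (produce_possibilities_py mustcount srccond)

-- ===== LEMMAS AND PROOFS =====

-- the '?'-position list, with explicit start index
def pvQpos (s : List Char) (i : Int) : List Int :=
  ((PySem.List.enumerate s i).filter (fun p => p.2 == '?')).map (fun p => p.1)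

-- common normal form: substitute the chars of ps into the '?' positions of s, left to right
def pvMerge : List Char → List Char → List Char
  | [], _ => []
  | x :: s, ps => if x = '?' then ps.headD '?' :: pvMerge s ps.tail else x :: pvMerge s ps

-- positions among qs whose paired char is '#'
def pvSelect : List Int → List Char → List Int
  | q :: qs, c :: cs => if c = '#' then q :: pvSelect qs cs else pvSelect qs cs
  | _, _ => []

-- B's string builder, with explicit start index
def pvRender (s : List Char) (i : Int) (chosen : List Int) : List Char :=
  (PySem.List.enumerate s i).map
    (fun p => if chosen.contains p.1 then '#' else if p.2 == '?' then '.' else p.2)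

theorem pvQpos_nil (i : Int) : pvQpos [] i = [] := by
  simp [pvQpos, PySem.List.enumerate_nil]

theorem pvQpos_cons (x : Char) (s : List Char) (i : Int) :
    pvQpos (x :: s) i = (if x = '?' then [i] else []) ++ pvQpos s (i + 1) := by
  simp only [pvQpos, PySem.List.enumerate_cons, List.filter_cons]
  by_cases h : x = '?' <;> simp [h]

theorem length_pvQpos (s : List Char) (i : Int) : (pvQpos s i).length = s.count '?' := by
  induction s generalizing i with
  | nil => simp [pvQpos_nil]
  | cons x s ih =>
    rw [pvQpos_cons]
    by_cases h : x = '?' <;> simp [h, List.count_cons, ih]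

theorem mem_pvQpos_ge (s : List Char) (i : Int) (x : Int) (hx : x ∈ pvQpos s i) : i ≤ x := by
  induction s generalizing i with
  | nil => simp [pvQpos_nil] at hx
  | cons c s ih =>
    rw [pvQpos_cons] at hx
    rcases List.mem_append.1 hx with h | h
    · by_cases hc : c = '?' <;> simp [hc] at h; omega
    · have := ih (i + 1) h; omega

theorem pvSelect_subset (qs : List Int) (cs : List Char) (x : Int) (hx : x ∈ pvSelect qs cs) :
    x ∈ qs := by
  induction qs generalizing cs with
  | nil => simp [pvSelect] at hx
  | cons q qs ih =>
    cases cs with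
    | nil => simp [pvSelect] at hx
    | cons c cs =>
      simp only [pvSelect] at hx
      by_cases hc : c = '#' <;> simp [hc] at hx
      · rcases hx with h | h
        · simp [h]
        · exact List.mem_cons_of_mem _ (ih cs h)
      · exact List.mem_cons_of_mem _ (ih cs hx)

theorem mem_pvProd (n : Nat) (p : List Char) (hp : p ∈ pvProd n) :
    p.length = n ∧ ∀ c ∈ p, c = '#' ∨ c = '.' := by
  induction n generalizing p with
  | zero => simp [pvProd] at hp; simp [hp]
  | succ n ih =>
    simp only [pvProd, List.mem_append, List.mem_map] at hp
    rcases hp with ⟨q, hq, rfl⟩ | ⟨q, hq, rfl⟩ <;>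
      rcases ih q hq with ⟨hl, hc⟩ <;>
      refine ⟨by simp [hl], ?_⟩ <;> intro c hc' <;> rcases List.mem_cons.1 hc' with rfl | h <;>
      first | (left; rfl) | (right; rfl) | exact hc c h

theorem pv_set_mid (pre : List Char) (t0 ch : Char) (t : List Char) :
    (pre ++ t0 :: t).set pre.length ch = pre ++ ch :: t := by
  induction pre with
  | nil => simp
  | cons a pre ih => simp [List.set, ih]


-- the in-place fill of A equals pvMerge, for any buffer agreeing with s off the '?' positions
theorem pv_fill_eq_merge (s : List Char) :
    ∀ (pre t ps : List Char), t.length = s.length → ps.length = s.count '?' →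
      (∀ k : Nat, s[k]? ≠ some '?' → t[k]? = s[k]?) →
      ((pvQpos s (pre.length : Int)).zip ps).foldl
          (fun c pc => PySem.List.pySetD c pc.1 pc.2) (pre ++ t)
        = pre ++ pvMerge s ps := by
  induction s with
  | nil =>
    intro pre t ps ht _ _
    have : t = [] := List.eq_nil_of_length_eq_zero ht
    simp [this, pvQpos_nil, pvMerge]
  | cons x s ih =>
    intro pre t ps ht hps hagree
    cases t with
    | nil => simp at ht
    | cons t0 t =>
      rw [pvQpos_cons]
      by_cases hx : x = '?'
      · subst hx
        cases ps with
        | nil => simp [List.count_cons] at hps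
        | cons ch ps =>
          rw [if_pos rfl]
          simp only [List.singleton_append, List.zip_cons_cons, List.foldl_cons]
          rw [PySem.List.pySetD_natCast, pv_set_mid]
          have h2 : ((pre.length : Int) + 1) = (((pre ++ [ch]).length : Nat) : Int) := by
            simp
          rw [show pre ++ ch :: t = (pre ++ [ch]) ++ t by simp, h2,
            ih (pre ++ [ch]) t ps (by simpa using ht) (by simpa [List.count_cons] using hps)
              (fun k hk => by have := hagree (k + 1); simpa using this (by simpa using hk))]
          simp [pvMerge]
      · have ht0 : t0 = x := by
          have := hagree 0 (by simp [hx])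
          simpa using this
        subst ht0
        simp only [if_neg hx, List.nil_append]
        have h2 : ((pre.length : Int) + 1) = (((pre ++ [t0]).length : Nat) : Int) := by simp
        rw [show pre ++ t0 :: t = (pre ++ [t0]) ++ t by simp, h2,
          ih (pre ++ [t0]) t ps (by simpa using ht) (by simpa [List.count_cons, hx] using hps)
            (fun k hk => by have := hagree (k + 1); simpa using this (by simpa using hk))]
        simp [pvMerge, hx]

theorem length_pvMerge (s ps : List Char) : (pvMerge s ps).length = s.length := by
  induction s generalizing ps with
  | nil => simp [pvMerge]
  | cons x s ih => by_cases hx : x = '?' <;> simp [pvMerge, hx, ih]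

theorem pvMerge_agree (s : List Char) :
    ∀ (ps : List Char) (k : Nat), s[k]? ≠ some '?' → (pvMerge s ps)[k]? = s[k]? := by
  induction s with
  | nil => intro ps k _; simp [pvMerge]
  | cons x s ih =>
    intro ps k hk
    cases k with
    | zero =>
      have hx : x ≠ '?' := by simpa using hk
      simp [pvMerge, hx]
    | succ k =>
      by_cases hx : x = '?' <;>
        simpa [pvMerge, hx] using ih _ k (by simpa using hk)

theorem count_pvMerge (s : List Char) :
    ∀ ps : List Char, ps.length = s.count '?' →
      (pvMerge s ps).count '#' = s.count '#' + ps.count '#' := by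
  induction s with
  | nil =>
    intro ps h
    have : ps = [] := List.eq_nil_of_length_eq_zero (by simpa using h)
    simp [pvMerge, this]
  | cons x s ih =>
    intro ps h
    by_cases hx : x = '?'
    · subst hx
      cases ps with
      | nil => simp [List.count_cons] at h
      | cons ch ps =>
        have := ih ps (by simpa [List.count_cons] using h)
        simp only [pvMerge, if_pos rfl, List.headD_cons, List.tail_cons, List.count_cons, this]
        by_cases hch : ch = '#' <;> simp [hch] <;> omega
    · have := ih ps (by simpa [List.count_cons, hx] using h)
      simp only [pvMerge, if_neg hx, List.count_cons, this]
      by_cases hxh : x = '#' <;> simp [hxh] <;> omega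

theorem pvSelect_not_mem (s : List Char) (i j : Int) (ps : List Char) (hj : j < i) :
    j ∉ pvSelect (pvQpos s i) ps := by
  intro hmem
  have h1 := pvSelect_subset _ _ _ hmem
  have := mem_pvQpos_ge s i j h1
  omega

theorem pvRender_irrel (s : List Char) (i a : Int) (rest : List Int) (ha : a < i) :
    pvRender s i (a :: rest) = pvRender s i rest := by
  unfold pvRender
  refine List.map_congr_left ?_
  intro p hp
  rcases (PySem.List.mem_enumerate_iff _ _ _).1 hp with ⟨k, hk, rfl⟩
  have hne : ¬ (i + (k : Int) = a) := by omega
  simp [List.contains_cons, hne]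

theorem pvRender_cons (x : Char) (s : List Char) (i : Int) (chosen : List Int) :
    pvRender (x :: s) i chosen
      = (if chosen.contains i then '#' else if x == '?' then '.' else x)
          :: pvRender s (i + 1) chosen := by
  simp [pvRender, PySem.List.enumerate_cons]

theorem pvRender_select (s : List Char) :
    ∀ (i : Int) (ps : List Char), ps.length = s.count '?' → (∀ c ∈ ps, c = '#' ∨ c = '.') →
      pvRender s i (pvSelect (pvQpos s i) ps) = pvMerge s ps := by
  induction s with
  | nil => intro i ps _ _; simp [pvRender, PySem.List.enumerate_nil, pvMerge]
  | cons x s ih =>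
    intro i ps hlen hch
    by_cases hx : x = '?'
    · subst hx
      cases ps with
      | nil => simp [List.count_cons] at hlen
      | cons ch ps =>
        rw [pvQpos_cons, if_pos rfl]
        simp only [List.singleton_append, pvSelect]
        have hlen' : ps.length = s.count '?' := by simpa [List.count_cons] using hlen
        have hch' : ∀ c ∈ ps, c = '#' ∨ c = '.' := fun c hc => hch c (by simp [hc])
        rcases hch ch (by simp) with h1 | h1
        · subst h1
          rw [if_pos rfl, pvRender_cons, pvRender_irrel s (i + 1) i _ (by omega),
            ih (i + 1) ps hlen' hch']
          simp [pvMerge, List.contains_cons]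
        · subst h1
          rw [if_neg (by decide), pvRender_cons, ih (i + 1) ps hlen' hch']
          have hc := pvSelect_not_mem s (i + 1) i ps (by omega)
          simp [pvMerge, List.contains_eq_mem, hc]
    · rw [pvQpos_cons, if_neg hx]
      simp only [List.nil_append]
      have hlen' : ps.length = s.count '?' := by simpa [List.count_cons, hx] using hlen
      rw [pvRender_cons, ih (i + 1) ps hlen' hch]
      have hc := pvSelect_not_mem s (i + 1) i ps (by omega)
      simp [pvMerge, hx, List.contains_eq_mem, hc]

theorem pv_flatMap_congr {α β : Type} (l : List α) (f g : α → List β)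
    (h : ∀ x ∈ l, f x = g x) : l.flatMap f = l.flatMap g := by
  induction l with
  | nil => rfl
  | cons a l ih =>
    simp only [List.flatMap_cons, h a (by simp),
      ih (fun x hx => h x (by simp [hx]))]

theorem pv_flatMap_nil {α β : Type} (l : List α) : l.flatMap (fun _ => ([] : List β)) = [] := by
  induction l with
  | nil => rfl
  | cons a l ih => simp [List.flatMap_cons, ih]

-- filtering product("#.", repeat=k) by '#'-count, reading off the chosen positions,
-- enumerates exactly combinations(qs, n) in order
theorem pv_prod_filter_eq_combs (qs : List Int) :
    ∀ (n : Nat) (f : List Int → String),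
      (pvProd qs.length).flatMap
          (fun p => if p.count '#' = n then [f (pvSelect qs p)] else [])
        = (pvCombs qs n).map f := by
  induction qs with
  | nil =>
    intro n f
    cases n with
    | zero => simp [pvProd, pvCombs, pvSelect]
    | succ n => simp [pvProd, pvCombs]
  | cons q qs ih =>
    intro n f
    simp only [List.length_cons, pvProd, List.flatMap_append, List.flatMap_map]
    have hsharp : ∀ p : List Char, ('#' :: p).count '#' = p.count '#' + 1 := by
      intro p; simp [List.count_cons]
    have hdot : ∀ p : List Char, ('.' :: p).count '#' = p.count '#' := by
      intro p; simp [List.count_cons]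
    have hsel1 : ∀ p : List Char, pvSelect (q :: qs) ('#' :: p) = q :: pvSelect qs p := by
      intro p; simp [pvSelect]
    have hsel2 : ∀ p : List Char, pvSelect (q :: qs) ('.' :: p) = pvSelect qs p := by
      intro p; simp [pvSelect]
    cases n with
    | zero =>
      have h1 : (pvProd qs.length).flatMap
          (fun p => if ('#' :: p).count '#' = 0 then [f (pvSelect (q :: qs) ('#' :: p))] else [])
          = [] := by
        rw [pv_flatMap_congr _ _ (fun _ => []) (fun p _ => by simp [hsharp p]), pv_flatMap_nil]
      have h2 : (pvProd qs.length).flatMap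
          (fun p => if ('.' :: p).count '#' = 0 then [f (pvSelect (q :: qs) ('.' :: p))] else [])
          = (pvCombs qs 0).map f := by
        rw [pv_flatMap_congr _ _
          (fun p => if p.count '#' = 0 then [f (pvSelect qs p)] else [])
          (fun p _ => by rw [hdot p, hsel2 p]), ih 0 f]
      rw [h1, h2]
      simp [pvCombs]
    | succ m =>
      have h1 : (pvProd qs.length).flatMap
          (fun p => if ('#' :: p).count '#' = m + 1 then [f (pvSelect (q :: qs) ('#' :: p))] else [])
          = (pvCombs qs m).map (fun l => f (q :: l)) := by
        rw [pv_flatMap_congr _ _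
          (fun p => if p.count '#' = m then [(fun l => f (q :: l)) (pvSelect qs p)] else [])
          (fun p _ => by
            simp only [hsharp, hsel1]
            by_cases hc : p.count '#' = m
            · simp [hc]
            · simp [hc]),
          ih m (fun l => f (q :: l))]
      have h2 : (pvProd qs.length).flatMap
          (fun p => if ('.' :: p).count '#' = m + 1 then [f (pvSelect (q :: qs) ('.' :: p))] else [])
          = (pvCombs qs (m + 1)).map f := by
        rw [pv_flatMap_congr _ _
          (fun p => if p.count '#' = m + 1 then [f (pvSelect qs p)] else [])
          (fun p _ => by rw [hdot p, hsel2 p]), ih (m + 1) f]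
      rw [h1, h2]
      simp [pvCombs, List.map_map, Function.comp_def]

-- A's generator loop, as a flatMap over the merged fills
theorem pv_foldA (mustcount : Int) (s : List Char) :
    ∀ (ps : List (List Char)) (buf : List Char) (acc : List String),
      buf.length = s.length → (∀ k : Nat, s[k]? ≠ some '?' → buf[k]? = s[k]?) →
      (∀ p ∈ ps, p.length = s.count '?') →
      (ps.foldl
          (fun st possib =>
            let c := ((pvQpos s 0).zip possib).foldl
              (fun c pc => PySem.List.pySetD c pc.1 pc.2) st.1
            if (PySem.List.count c '#' : Int) ≠ mustcount then (c, st.2)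
            else (c, st.2 ++ [String.ofList c]))
          (buf, acc)).2
        = acc ++ ps.flatMap (fun p =>
            if (PySem.List.count (pvMerge s p) '#' : Int) ≠ mustcount then []
            else [String.ofList (pvMerge s p)]) := by
  intro ps
  induction ps with
  | nil => intro buf acc _ _ _; simp
  | cons p ps ih =>
    intro buf acc hc hagree hmem
    have hfill : ((pvQpos s 0).zip p).foldl
        (fun c pc => PySem.List.pySetD c pc.1 pc.2) buf = pvMerge s p := by
      have := pv_fill_eq_merge s [] buf p hc (hmem p (by simp)) hagree
      simpa using this
    simp only [List.foldl_cons, hfill, List.flatMap_cons]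
    by_cases hcond : (PySem.List.count (pvMerge s p) '#' : Int) ≠ mustcount
    · rw [if_pos hcond, if_pos hcond,
        ih (pvMerge s p) acc (length_pvMerge s p) (pvMerge_agree s p)
          (fun q hq => hmem q (by simp [hq]))]
      simp
    · rw [if_neg hcond, if_neg hcond,
        ih (pvMerge s p) (acc ++ [String.ofList (pvMerge s p)]) (length_pvMerge s p) (pvMerge_agree s p)
          (fun q hq => hmem q (by simp [hq]))]
      simp

-- ===== VERDICT (by name: the statement is the Claim_ definition above) =====
theorem produce_possibilities_py_spec : Claim_equal_produce_possibilities_py := by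
  unfold Claim_equal_produce_possibilities_py
  intro mustcount srccond _
  unfold Spec_produce_possibilities_py produce_possibilities_py produce_possibilities_py_alt
  simp only []
  have hq : ((PySem.List.enumerate srccond.toList 0).filter (fun p => p.2 == '?')).map
      (fun p => p.1) = pvQpos srccond.toList 0 := rfl
  rw [hq]
  have hmemlen : ∀ p ∈ pvProd (pvQpos srccond.toList 0).length,
      p.length = srccond.toList.count '?' := by
    intro p hp
    rw [(mem_pvProd _ p hp).1, length_pvQpos]
  rw [pv_foldA mustcount srccond.toList (pvProd (pvQpos srccond.toList 0).length)
    srccond.toList [] rfl (fun _ _ => rfl) hmemlen]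
  simp only [PySem.List.count_eq, List.nil_append]
  by_cases hskip : (mustcount - (srccond.toList.count '#' : Int) < 0 ∨
      ((pvQpos srccond.toList 0).length : Int) < mustcount - (srccond.toList.count '#' : Int))
  · rw [if_pos hskip, pv_flatMap_congr _ _ (fun _ => ([] : List String)) ?_, pv_flatMap_nil]
    intro p hp
    have hlen2 : p.length = (pvQpos srccond.toList 0).length := (mem_pvProd _ p hp).1
    have hcnt : p.count '#' ≤ p.length := List.count_le_length
    rw [if_pos ?_]
    rw [count_pvMerge srccond.toList p (hmemlen p hp)]
    rcases hskip with h | h <;> push_cast at h ⊢ <;> omega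
  · have hneg : ¬ mustcount - (srccond.toList.count '#' : Int) < 0 :=
      fun h => hskip (Or.inl h)
    rw [if_neg hskip]
    have hren : (fun chosen => String.ofList ((PySem.List.enumerate srccond.toList 0).map
        (fun p => if chosen.contains p.1 then '#' else if p.2 == '?' then '.' else p.2)))
        = (fun chosen => String.ofList (pvRender srccond.toList 0 chosen)) := rfl
    rw [hren]
    have hcongr : ∀ p ∈ pvProd (pvQpos srccond.toList 0).length,
        (if ((pvMerge srccond.toList p).count '#' : Int) ≠ mustcount then ([] : List String)
          else [String.ofList (pvMerge srccond.toList p)])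
          = if p.count '#' = (mustcount - (srccond.toList.count '#' : Int)).toNat
              then [(fun chosen => String.ofList (pvRender srccond.toList 0 chosen))
                      (pvSelect (pvQpos srccond.toList 0) p)]
              else [] := by
      intro p hp
      rcases mem_pvProd _ p hp with ⟨hlenp, hchp⟩
      have hlen' : p.length = srccond.toList.count '?' := hmemlen p hp
      rw [count_pvMerge srccond.toList p hlen',
        ← pvRender_select srccond.toList 0 p hlen' hchp]
      by_cases hcnt : p.count '#' = (mustcount - (srccond.toList.count '#' : Int)).toNat
      · rw [if_neg (by push_cast; omega), if_pos hcnt]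
      · rw [if_pos (by push_cast; omega), if_neg hcnt]
    exact (pv_flatMap_congr _ _ _ hcongr).trans
      (pv_prod_filter_eq_combs (pvQpos srccond.toList 0)
        (mustcount - (srccond.toList.count '#' : Int)).toNat
        (fun chosen => String.ofList (pvRender srccond.toList 0 chosen)))
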